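-- pv_equiv track=rewrite | github.com/diegocastroms-svg/RELATORIO-DE-ALERTAS | main.py | cb_parse
-- ===== SOURCE A (Python) =====
-- def cb_parse(data):
--     out = {"K": None, "F": None, "D": None, "S": None}
--     if not data:
--         return out
--     pieces = data.split("|")
--     for p in pieces:
--         if "=" in p:
--             a, b = p.split("=", 1)
--             if a in out:
--                 out[a] = b
--     return out
-- ===== SOURCE B (Python) =====
-- def cb_parse(data):
--     out = {"K": None, "F": None, "D": None, "S": None}
--     if not data:
--         return out
--     parsed = dict(p.split("=", 1) for p in data.split("|") if "=" in p)
--     for k in ("K", "F", "D", "S"):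
--         if k in parsed:
--             out[k] = parsed[k]
--     return out
-- ===== Notes on version B (the rewrite author's own statement) =====
-- stated objective: idiomatic
-- what changed: B first builds one table of all parsed key=value pairs with a dict comprehension (duplicates keep the last value), then fills the fixed output by a pass over its four known keys, instead of A's filtering loop that tests and updates the output dict piece by piece.
import Mathlib
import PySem

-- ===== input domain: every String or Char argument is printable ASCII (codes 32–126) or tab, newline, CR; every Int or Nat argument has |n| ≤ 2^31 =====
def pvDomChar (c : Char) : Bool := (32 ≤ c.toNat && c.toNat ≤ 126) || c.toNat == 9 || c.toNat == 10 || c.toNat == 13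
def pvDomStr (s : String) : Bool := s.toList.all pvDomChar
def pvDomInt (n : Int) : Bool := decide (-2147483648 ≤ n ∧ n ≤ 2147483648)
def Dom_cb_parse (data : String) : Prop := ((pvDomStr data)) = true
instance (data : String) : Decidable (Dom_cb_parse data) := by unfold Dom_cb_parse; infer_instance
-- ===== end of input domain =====

-- B builds one table of every parsed pair, then fills the fixed dict by a pass over its four keys
-- (idiomatic decomposition, same cost); A filters and updates the output dict piece by piece.

-- ===== PORT A =====
-- the fixed initial dict {"K": None, "F": None, "D": None, "S": None}
def cbOut0 : PySem.Dict String (Option String) :=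
  PySem.Dict.mk [("K", none), ("F", none), ("D", none), ("S", none)]

-- loop body of A: if "=" in p: a, b = p.split("=", 1); if a in out: out[a] = b
def cbStepA (o : PySem.Dict String (Option String)) (p : String) :
    PySem.Dict String (Option String) :=
  if PySem.Str.isIn "=" p then
    let parts := (PySem.Str.splitMax? p "=" 1).getD []
    let a := parts.headD ""
    let b := parts.getD 1 ""
    if (o.get? a).isSome then o.insert a (some b) else o
  else o

def cb_parse (data : String) : List (String × Option String) :=
  if data = "" then cbOut0.items
  else
    let pieces := (PySem.Str.split? data "|").getD []
    (pieces.foldl cbStepA cbOut0).items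

-- ===== PORT B =====
-- generator body of B: (p.split("=", 1) for p in … if "=" in p), accumulated by dict()
def cbStepB (d : PySem.Dict String String) (p : String) : PySem.Dict String String :=
  if PySem.Str.isIn "=" p then
    let parts := (PySem.Str.splitMax? p "=" 1).getD []
    d.insert (parts.headD "") (parts.getD 1 "")
  else d

-- B's second loop: for k in ("K","F","D","S"): if k in parsed: out[k] = parsed[k]
def cbApplyB (parsed : PySem.Dict String String) : PySem.Dict String (Option String) :=
  ["K", "F", "D", "S"].foldl (fun o k =>
    match parsed.get? k with
    | some v => o.insert k (some v)
    | none => o) cbOut0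

def cb_parse_alt (data : String) : List (String × Option String) :=
  if data = "" then cbOut0.items
  else
    let parsed := ((PySem.Str.split? data "|").getD []).foldl cbStepB PySem.Dict.empty
    (cbApplyB parsed).items

-- ===== PRECONDITION & SPEC =====
def Spec_cb_parse (data : String) (out : List (String × Option String)) : Prop := out = cb_parse_alt data
instance (data : String) (out : List (String × Option String)) : Decidable (Spec_cb_parse data out) := by unfold Spec_cb_parse; infer_instance

-- ===== CLAIM (what is proved, stated in full; the proofs are below) =====
def Claim_equal_cb_parse : Prop := ∀ (data : String), Dom_cb_parse data → Spec_cb_parse data (cb_parse data)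

-- ===== LEMMAS AND PROOFS =====

-- cbApplyB d is the fixed 4-key dict whose values are d's lookups
lemma cbApplyB_eq (d : PySem.Dict String String) :
    cbApplyB d = PySem.Dict.mk
      [("K", d.get? "K"), ("F", d.get? "F"), ("D", d.get? "D"), ("S", d.get? "S")] := by
  rcases hK : d.get? "K" <;> rcases hF : d.get? "F" <;> rcases hD : d.get? "D" <;>
    rcases hS : d.get? "S" <;>
  simp [cbApplyB, cbOut0, hK, hF, hD, hS, PySem.Dict.insert]

-- one update: A's conditional insert into the applied dict = applying B's updated table
lemma cbIns_comm (d : PySem.Dict String String) (a b : String) :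
    (if ((cbApplyB d).get? a).isSome then (cbApplyB d).insert a (some b) else cbApplyB d)
      = cbApplyB (d.insert a b) := by
  rw [cbApplyB_eq d, cbApplyB_eq (d.insert a b)]
  by_cases hK : a = "K"
  · subst hK
    rw [PySem.Dict.get?_insert_self d "K" b,
        PySem.Dict.get?_insert_of_ne d b (by decide : "F" ≠ "K"),
        PySem.Dict.get?_insert_of_ne d b (by decide : "D" ≠ "K"),
        PySem.Dict.get?_insert_of_ne d b (by decide : "S" ≠ "K")]
    simp [PySem.Dict.get?, PySem.Dict.insert]
  by_cases hF : a = "F"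
  · subst hF
    rw [PySem.Dict.get?_insert_self d "F" b,
        PySem.Dict.get?_insert_of_ne d b (by decide : "K" ≠ "F"),
        PySem.Dict.get?_insert_of_ne d b (by decide : "D" ≠ "F"),
        PySem.Dict.get?_insert_of_ne d b (by decide : "S" ≠ "F")]
    simp [PySem.Dict.get?, PySem.Dict.insert]
  by_cases hD : a = "D"
  · subst hD
    rw [PySem.Dict.get?_insert_self d "D" b,
        PySem.Dict.get?_insert_of_ne d b (by decide : "K" ≠ "D"),
        PySem.Dict.get?_insert_of_ne d b (by decide : "F" ≠ "D"),
        PySem.Dict.get?_insert_of_ne d b (by decide : "S" ≠ "D")]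
    simp [PySem.Dict.get?, PySem.Dict.insert]
  by_cases hS : a = "S"
  · subst hS
    rw [PySem.Dict.get?_insert_self d "S" b,
        PySem.Dict.get?_insert_of_ne d b (by decide : "K" ≠ "S"),
        PySem.Dict.get?_insert_of_ne d b (by decide : "F" ≠ "S"),
        PySem.Dict.get?_insert_of_ne d b (by decide : "D" ≠ "S")]
    simp [PySem.Dict.get?, PySem.Dict.insert]
  · rw [PySem.Dict.get?_insert_of_ne d b (Ne.symm hK),
        PySem.Dict.get?_insert_of_ne d b (Ne.symm hF),
        PySem.Dict.get?_insert_of_ne d b (Ne.symm hD),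
        PySem.Dict.get?_insert_of_ne d b (Ne.symm hS)]
    simp [PySem.Dict.get?, Ne.symm hK, Ne.symm hF, Ne.symm hD, Ne.symm hS]

-- one piece: A's update of the applied dict = applying B's updated table
lemma cbStep_comm (d : PySem.Dict String String) (p : String) :
    cbStepA (cbApplyB d) p = cbApplyB (cbStepB d p) := by
  unfold cbStepA cbStepB
  by_cases h : PySem.Str.isIn "=" p = true
  · rw [if_pos h, if_pos h]; exact cbIns_comm d _ _
  · rw [if_neg h, if_neg h]

-- the whole loop: A's fold from cbApplyB d = cbApplyB of B's fold from d
lemma cbFold_comm (pieces : List String) (d : PySem.Dict String String) :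
    pieces.foldl cbStepA (cbApplyB d) = cbApplyB (pieces.foldl cbStepB d) := by
  induction pieces generalizing d with
  | nil => rfl
  | cons p ps ih => simp only [List.foldl_cons, cbStep_comm]; exact ih _

lemma cbApplyB_empty : cbApplyB PySem.Dict.empty = cbOut0 := by decide

-- ===== VERDICT (by name: the statement is the Claim_ definition above) =====
theorem cb_parse_spec : Claim_equal_cb_parse := by
  intro data _
  unfold Spec_cb_parse cb_parse cb_parse_alt
  by_cases h : data = ""
  · simp [h]
  · simp only [h, if_false]
    rw [← cbApplyB_empty, cbFold_comm]
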